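-- pv_equiv track=rewrite | github.com/shaigue/mathqa | program_graph/extract_dags.py | _edge_match
-- ===== SOURCE A (Python) =====
-- from itertools import count, permutations
--
-- def _edge_match(e1, e2):
--     # check if there exists a permutation of them so they match on their values
--     if len(e1) != len(e2):
--         return False
--     n = len(e1)
--     for perm in permutations(range(n)):
--         if all([e1[i] == e2[perm[i]] for i in range(n)]):
--             return True
--     return False
-- ===== SOURCE B (Python) =====
-- def _edge_match(e1, e2):
--     # multiset equality: sort both once and compare, instead of searching all n! permutations
--     return sorted(e1) == sorted(e2)
-- ===== Notes on version B (the rewrite author's own statement) =====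
-- stated objective: simpler
-- what changed: B tests multiset equality with a single sorted(e1) == sorted(e2) comparison instead of enumerating all n! index permutations and checking positional matches; the length guard is subsumed by the sorted-list comparison.
import Mathlib
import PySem

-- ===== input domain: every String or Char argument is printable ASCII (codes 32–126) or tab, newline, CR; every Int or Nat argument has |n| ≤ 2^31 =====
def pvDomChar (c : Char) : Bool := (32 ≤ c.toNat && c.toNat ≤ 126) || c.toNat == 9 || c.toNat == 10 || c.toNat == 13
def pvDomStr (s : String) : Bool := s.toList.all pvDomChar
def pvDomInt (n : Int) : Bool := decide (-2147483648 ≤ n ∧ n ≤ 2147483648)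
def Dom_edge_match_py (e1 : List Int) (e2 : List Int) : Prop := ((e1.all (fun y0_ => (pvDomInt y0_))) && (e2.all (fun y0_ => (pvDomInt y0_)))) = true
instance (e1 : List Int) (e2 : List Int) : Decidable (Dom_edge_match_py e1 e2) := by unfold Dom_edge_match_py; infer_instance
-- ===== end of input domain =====

-- B replaces the search over all n! index permutations by sorting both lists once and comparing (multiset equality).


-- ===== PORT A =====
def edge_match_py (e1 : List Int) (e2 : List Int) : Bool :=
  if e1.length != e2.length then false
  else
    (PySem.List.permutations (PySem.List.pyRange 0 (e1.length : Int) 1) e1.length).any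
      (fun perm => (List.range e1.length).all
        (fun i => PySem.List.pyGetD e1 (i : Int) 0 ==
                  PySem.List.pyGetD e2 (PySem.List.pyGetD perm (i : Int) 0) 0))

-- ===== PORT B =====
def edge_match_py_alt (e1 : List Int) (e2 : List Int) : Bool :=
  PySem.List.sorted e1 (fun x => x) == PySem.List.sorted e2 (fun x => x)

-- ===== PRECONDITION & SPEC =====
def Spec_edge_match_py (e1 : List Int) (e2 : List Int) (out : Bool) : Prop := out = edge_match_py_alt e1 e2
instance (e1 : List Int) (e2 : List Int) (out : Bool) : Decidable (Spec_edge_match_py e1 e2 out) := by unfold Spec_edge_match_py; infer_instance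

-- ===== CLAIM (what is proved, stated in full; the proofs are below) =====
def Claim_equal_edge_match_py : Prop := ∀ (e1 : List Int) (e2 : List Int), Dom_edge_match_py e1 e2 → Spec_edge_match_py e1 e2 (edge_match_py e1 e2)

-- ===== LEMMAS AND PROOFS =====

-- reading every position of a list in order reproduces the list
theorem pv_map_getD_range {α : Type} (l : List α) (d : α) :
    (List.range l.length).map (fun i => l.getD i d) = l := by
  apply List.ext_getElem
  · simp
  · intro i h1 h2
    simp [List.getD_eq_getElem?_getD, List.getElem?_eq_getElem h2]

-- every rearrangement of a list arises by reading it through a permutation of its index list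
theorem pv_exists_index_perm (e1 e2 : List Int) (h : e1.Perm e2) :
    ∃ p : List ℕ, p.Perm (List.range e2.length) ∧ p.map (fun i => e2.getD i 0) = e1 := by
  induction h with
  | nil => exact ⟨[], by simp⟩
  | cons x h' ih =>
    rename_i t1 t2
    obtain ⟨p', hp', he⟩ := ih
    refine ⟨0 :: p'.map (· + 1), ?_, ?_⟩
    · rw [List.length_cons, List.range_succ_eq_map]
      exact (hp'.map (· + 1)).cons 0
    · rw [List.map_cons, List.map_map]
      have : ((fun i => (x :: t2).getD i 0) ∘ (· + 1)) = (fun i => t2.getD i 0) := by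
        funext i; rfl
      rw [this, he]
      rfl
  | swap x y l =>
    refine ⟨1 :: 0 :: (List.range l.length).map (· + 2), ?_, ?_⟩
    · have hr : List.range (x :: y :: l).length = 0 :: 1 :: (List.range l.length).map (· + 2) := by
        rw [show (x :: y :: l).length = l.length + 1 + 1 by simp,
            List.range_succ_eq_map, List.range_succ_eq_map, List.map_cons, List.map_map]
        rfl
      rw [hr]
      exact List.Perm.swap 0 1 _
    · rw [List.map_cons, List.map_cons, List.map_map]
      have : ((fun i => (x :: y :: l).getD i 0) ∘ (· + 2)) = (fun i => l.getD i 0) := by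
        funext i; rfl
      rw [this, pv_map_getD_range l 0]
      rfl
  | trans h1 h2 ih1 ih2 =>
    rename_i l1 l2 l3
    obtain ⟨p1, hp1, he1⟩ := ih1
    obtain ⟨p2, hp2, he2⟩ := ih2
    have hlen : l2.length = p2.length := by rw [← he2]; simp
    refine ⟨p1.map (fun i => p2.getD i 0), ?_, ?_⟩
    · have hmr : (List.range l2.length).map (fun i => p2.getD i 0) = p2 := by
        rw [hlen]; exact pv_map_getD_range p2 0
      exact (hmr ▸ hp1.map (fun i => p2.getD i 0)).trans hp2
    · rw [List.map_map, ← he1]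
      apply List.map_congr_left
      intro i hi
      have hilt : i < l2.length := by simpa using hp1.mem_iff.mp hi
      have hilt2 : i < p2.length := hlen ▸ hilt
      have hlt3 : p2[i] < l3.length := by
        have : p2[i] ∈ List.range l3.length := hp2.mem_iff.mp (List.getElem_mem hilt2)
        simpa using this
      simp only [Function.comp_apply]
      rw [List.getD_eq_getElem _ _ hilt2, ← he2]
      rw [List.getD_eq_getElem _ _ (by simpa [← hlen] using hilt2 : i < (p2.map (fun i => l3.getD i 0)).length)]
      rw [List.getElem_map, List.getD_eq_getElem _ _ hlt3]

-- completeness of PySem.List.permutations: every rearrangement of xs occurs in permutations xs |p|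
theorem pv_mem_permutations_of_perm (p : List Int) :
    ∀ xs : List Int, p.Perm xs → p ∈ PySem.List.permutations xs p.length := by
  induction p with
  | nil =>
    intro xs h
    have : xs = [] := h.symm.eq_nil
    subst this
    simp [PySem.List.permutations_zero]
  | cons a p' ih =>
    intro xs h
    have ha : a ∈ xs := h.mem_iff.mp (by simp)
    have hi : xs.idxOf a < xs.length := List.idxOf_lt_length_of_mem ha
    have hget : xs[xs.idxOf a]? = some a := by
      rw [List.getElem?_eq_getElem hi]
      simp [List.getElem_idxOf hi]
    have herase : xs.eraseIdx (xs.idxOf a) = xs.erase a :=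
      (List.erase_eq_eraseIdx_of_idxOf rfl).symm
    have hperm' : p'.Perm (xs.erase a) :=
      (List.perm_cons a).mp (h.trans (List.perm_cons_erase ha))
    have hmem : p' ∈ PySem.List.permutations (xs.eraseIdx (xs.idxOf a)) p'.length := by
      rw [herase]; exact ih _ hperm'
    rw [show (a :: p').length = p'.length + 1 from rfl, PySem.List.permutations_succ]
    refine List.mem_flatMap.mpr ⟨xs.idxOf a, by simpa using hi, ?_⟩
    rw [hget]
    exact List.mem_map.mpr ⟨p', hmem, rfl⟩

-- characterisation of A: the permutation search succeeds exactly on rearrangements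
theorem pv_A_iff_perm (e1 e2 : List Int) : edge_match_py e1 e2 = true ↔ e1.Perm e2 := by
  unfold edge_match_py
  by_cases hlen : e1.length = e2.length
  · have hcond : (e1.length != e2.length) = false := by simp [hlen]
    rw [hcond]
    simp only [Bool.false_eq_true, if_false, List.any_eq_true, List.all_eq_true, beq_iff_eq]
    constructor
    · rintro ⟨perm, hmem, hall⟩
      have hxlen : (PySem.List.pyRange 0 (e1.length : Int) 1).length = e1.length := by
        rw [PySem.List.pyRange_zero_natCast]; simp
      have hpperm : perm.Perm (PySem.List.pyRange 0 (e1.length : Int) 1) :=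
        PySem.List.perm_of_mem_permutations (by rw [hxlen]; exact hmem)
      have hplen : perm.length = e1.length := by rw [hpperm.length_eq, hxlen]
      have hvals : ∀ i ∈ List.range e1.length,
          e1.getD i 0 = PySem.List.pyGetD e2 (perm.getD i 0) 0 := by
        intro i hi
        have := hall i hi
        rwa [PySem.List.pyGetD_natCast e1 i 0,
             PySem.List.pyGetD_natCast perm i (0 : Int)] at this
      have he1 : e1 = perm.map (fun j => PySem.List.pyGetD e2 j 0) := by
        conv_lhs => rw [← pv_map_getD_range e1 0]
        rw [List.map_congr_left hvals,
            show (fun i => PySem.List.pyGetD e2 (perm.getD i 0) 0) =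
              ((fun j => PySem.List.pyGetD e2 j 0) ∘ (fun i => perm.getD i 0)) from rfl,
            ← List.map_map, ← hplen, pv_map_getD_range perm 0]
      have hfin : (PySem.List.pyRange 0 (e1.length : Int) 1).map
          (fun j => PySem.List.pyGetD e2 j 0) = e2 := by
        rw [PySem.List.pyRange_zero_natCast, List.map_map]
        rw [show ((fun j => PySem.List.pyGetD e2 j 0) ∘ (fun k : ℕ => (k : Int))) =
              (fun k : ℕ => e2.getD k 0) from funext fun k => PySem.List.pyGetD_natCast e2 k 0]
        rw [hlen, pv_map_getD_range e2 0]
      have hP := hpperm.map (fun j => PySem.List.pyGetD e2 j 0)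
      rw [hfin] at hP
      rw [he1]
      exact hP
    · intro h
      obtain ⟨p, hp, he⟩ := pv_exists_index_perm e1 e2 h
      have hplen : p.length = e2.length := by rw [hp.length_eq]; simp
      refine ⟨p.map (fun k : ℕ => (k : Int)), ?_, ?_⟩
      · have hPperm : (p.map (fun k : ℕ => (k : Int))).Perm
            (PySem.List.pyRange 0 (e1.length : Int) 1) := by
          rw [PySem.List.pyRange_zero_natCast, hlen]
          exact hp.map _
        have hPlen : (p.map (fun k : ℕ => (k : Int))).length = e1.length := by
          simp [hplen, hlen]
        have hM := pv_mem_permutations_of_perm _ _ hPperm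
        rwa [hPlen] at hM
      · intro i hi
        have hilt1 : i < e1.length := List.mem_range.mp hi
        have hiltp : i < p.length := by omega
        have hlt3 : p[i] < e2.length := by
          have : p[i] ∈ List.range e2.length := hp.mem_iff.mp (List.getElem_mem hiltp)
          simpa using this
        have hPv : PySem.List.pyGetD (p.map (fun k : ℕ => (k : Int))) (↑i) 0 = ((p[i] : ℕ) : Int) := by
          rw [PySem.List.pyGetD_natCast,
              List.getD_eq_getElem _ _ (by simpa using hiltp), List.getElem_map]
        rw [hPv, PySem.List.pyGetD_natCast e1 i 0, PySem.List.pyGetD_natCast e2 _ 0,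
            List.getD_eq_getElem e1 0 hilt1, List.getElem_of_eq he.symm hilt1,
            List.getElem_map, List.getD_eq_getElem e2 0 hlt3]
  · have hcond : (e1.length != e2.length) = true := by simpa using hlen
    rw [hcond]
    simp only [if_true]
    constructor
    · intro h; cases h
    · intro h; exact absurd h.length_eq hlen

-- characterisation of B: the sorted lists agree exactly on rearrangements
theorem pv_B_iff_perm (e1 e2 : List Int) : edge_match_py_alt e1 e2 = true ↔ e1.Perm e2 := by
  unfold edge_match_py_alt
  rw [beq_iff_eq]
  exact PySem.List.sorted_id_eq_sorted_id_iff_perm e1 e2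

-- ===== VERDICT (by name: the statement is the Claim_ definition above) =====
theorem edge_match_py_spec : Claim_equal_edge_match_py := by
  intro e1 e2 _
  unfold Spec_edge_match_py
  rw [Bool.eq_iff_iff, pv_A_iff_perm, pv_B_iff_perm]
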